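-- pv_equiv track=rewrite | github.com/eoinrogers/lstm_experiment | integrate.py | sort_ids_by_probability
-- ===== SOURCE A (Python) =====
-- def sort_ids_by_probability(input_vector, n):
--     '''
--     Get the indexes of the top n largest values in input_vector
--     '''
--     output = []
--     input_vector = input_vector[:] # Don't destroy the object on the caller.
--     while len(output) < n:
--         largest = input_vector.index(max(input_vector))
--         output.append(largest)
--         input_vector = [item for i, item in enumerate(input_vector) if i != largest]
--     return output
-- ===== SOURCE B (Python) =====
-- def sort_ids_by_probability(input_vector, n):
--     '''
--     Get the indexes of the top n largest values in input_vector
--     '''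
--     # One sort of the indices by (value descending, index ascending), then
--     # report each chosen index shifted down by how many earlier-chosen
--     # positions lie below it.
--     order = sorted(range(len(input_vector)), key=lambda i: (-input_vector[i], i))
--     output = []
--     for k, i in enumerate(order):
--         if k >= n:
--             break
--         output.append(i - sum(1 for j in order[:k] if j < i))
--     return output
-- ===== Notes on version B (the rewrite author's own statement) =====
-- stated objective: alternative
-- what changed: A repeatedly scans for the max, records its position and rebuilds the vector without it (n passes over a shrinking list); B sorts the indices once by (-value, index) and then derives each shifted position by counting previously chosen indices below it. Pre_ excludes n > len(input_vector), where A's loop empties the vector and max([]) raises ValueError.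
import Mathlib
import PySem

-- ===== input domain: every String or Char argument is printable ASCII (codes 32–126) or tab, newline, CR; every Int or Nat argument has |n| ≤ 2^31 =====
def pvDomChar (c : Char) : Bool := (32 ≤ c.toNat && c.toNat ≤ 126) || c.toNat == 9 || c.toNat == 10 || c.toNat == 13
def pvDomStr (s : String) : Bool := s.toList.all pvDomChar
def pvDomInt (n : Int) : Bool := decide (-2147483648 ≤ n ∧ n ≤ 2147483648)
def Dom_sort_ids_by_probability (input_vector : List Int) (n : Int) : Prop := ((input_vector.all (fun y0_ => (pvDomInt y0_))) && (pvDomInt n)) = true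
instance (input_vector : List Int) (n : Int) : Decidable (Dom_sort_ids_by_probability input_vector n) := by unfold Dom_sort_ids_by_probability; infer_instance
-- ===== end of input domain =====

-- B replaces A's repeated max-scan-and-rebuild loop by one sort of the indices by (-value, index) plus a shift count per emitted index.


-- ===== PORT A =====
-- the while loop: each pass takes the first index of the max, then rebuilds the vector
-- without that position ('[item for i, item in enumerate(input_vector) if i != largest]').
-- Fuel n.toNat: the loop appends exactly one element per pass, so it runs n times
-- (when the vector empties first, Python raises ValueError on max([]) — excluded by Pre_; the port returns []).
def pvALoop (v : List Int) : Nat → List Int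
  | 0 => []
  | k + 1 =>
    match PySem.List.max? v (fun x => x) with
    | none => []   -- max([]) raises ValueError in Python (outside Pre_)
    | some m =>
      match PySem.List.index? v m with
      | none => []  -- unreachable: the max is a member
      | some largest =>
        (largest : Int) ::
          pvALoop (((PySem.List.enumerate v 0).filter (fun p => p.1 ≠ (largest : Int))).map (·.2)) k

def sort_ids_by_probability (input_vector : List Int) (n : Int) : List Int :=
  pvALoop input_vector n.toNat

-- ===== PORT B =====
-- 'for k, i in enumerate(order): if k >= n: break; output.append(i - sum(1 for j in order[:k] if j < i))'
def pvBLoop (order : List Int) (n : Int) : Nat → List Int → List Int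
  | _, [] => []
  | k, i :: rest =>
    if (k : Int) ≥ n then []
    else
      (i - ((order.take k).map (fun j => if j < i then (1 : Int) else 0)).sum)
        :: pvBLoop order n (k + 1) rest

def sort_ids_by_probability_alt (input_vector : List Int) (n : Int) : List Int :=
  -- 'sorted(range(len(input_vector)), key=lambda i: (-input_vector[i], i))' — tuple key via sorted2
  let order := PySem.List.sorted2 (PySem.List.pyRange 0 (input_vector.length : Int) 1)
      (fun i => -(PySem.List.pyGetD input_vector i 0)) (fun i => i) false
  pvBLoop order n 0 order

-- ===== PRECONDITION & SPEC =====
-- Pre_ excludes exactly n > len(input_vector), where A's loop empties the vector and max([]) raises ValueError.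
def Pre_sort_ids_by_probability (input_vector : List Int) (n : Int) : Prop :=
  n ≤ (input_vector.length : Int)
instance (input_vector : List Int) (n : Int) : Decidable (Pre_sort_ids_by_probability input_vector n) := by unfold Pre_sort_ids_by_probability; infer_instance
def pvWitness_sort_ids_by_probability : List Int × Int := ([3, 1, 4, 1, 5], 3)

def Spec_sort_ids_by_probability (input_vector : List Int) (n : Int) (out : List Int) : Prop := out = sort_ids_by_probability_alt input_vector n
instance (input_vector : List Int) (n : Int) (out : List Int) : Decidable (Spec_sort_ids_by_probability input_vector n out) := by unfold Spec_sort_ids_by_probability; infer_instance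

-- ===== CLAIM (what is proved, stated in full; the proofs are below) =====
def Claim_equal_sort_ids_by_probability : Prop := ∀ (input_vector : List Int) (n : Int), Dom_sort_ids_by_probability input_vector n → Pre_sort_ids_by_probability input_vector n → Spec_sort_ids_by_probability input_vector n (sort_ids_by_probability input_vector n)

-- ===== LEMMAS AND PROOFS =====

def pvG (j i : Int) : Int := if i < j then i else i + 1

def pvShift (prior : List Int) : List Int → List Int
  | [] => []
  | i :: rest => (i - (prior.countP (fun j => j < i) : Int)) :: pvShift (prior ++ [i]) rest

theorem pvG_lt_iff (j a b : Int) : pvG j a < pvG j b ↔ a < b := by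
  unfold pvG; split_ifs <;> omega

theorem pvShift_map_g (j : Int) : ∀ (l prior : List Int),
    pvShift (j :: prior.map (pvG j)) (l.map (pvG j)) = pvShift prior l := by
  intro l
  induction l with
  | nil => intro prior; rfl
  | cons i rest ih =>
    intro prior
    simp only [List.map_cons, pvShift, List.countP_cons, List.countP_map, List.cons.injEq]
    refine ⟨?_, ?_⟩
    · have h1 : List.countP ((fun x => decide (x < pvG j i)) ∘ pvG j) prior
          = List.countP (fun x => decide (x < i)) prior := by
        apply List.countP_congr
        intro a _
        simp [Function.comp, pvG_lt_iff]
      rw [h1]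
      simp only [pvG]
      rcases lt_or_ge i j with h | h
      · simp only [if_pos h]
        simp [show ¬ j < i by omega]
      · simp only [if_neg (by omega : ¬ i < j)]
        simp [show j < i + 1 by omega]
    · have : (j :: List.map (pvG j) prior) ++ [pvG j i] = j :: List.map (pvG j) (prior ++ [i]) := by
        simp
      rw [this, ih]

def pvKey (v : List Int) (i : Int) : Int := i - (PySem.List.pyGetD v i 0) * (v.length : Int)

theorem pvKey_lt_iff (v : List Int) (i i' : Int)
    (hi : 0 ≤ i ∧ i < (v.length : Int)) (hi' : 0 ≤ i' ∧ i' < (v.length : Int)) :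
    pvKey v i < pvKey v i' ↔
      (PySem.List.pyGetD v i' 0 < PySem.List.pyGetD v i 0 ∨
        (PySem.List.pyGetD v i 0 = PySem.List.pyGetD v i' 0 ∧ i < i')) := by
  unfold pvKey
  set L : Int := (v.length : Int) with hL
  set a := PySem.List.pyGetD v i 0
  set b := PySem.List.pyGetD v i' 0
  constructor
  · intro h
    rcases lt_trichotomy a b with hab | hab | hab
    · exfalso
      have h1 : (b - a) * L ≥ 1 * L := by
        apply mul_le_mul_of_nonneg_right <;> omega
      nlinarith
    · right
      refine ⟨hab, ?_⟩
      rw [hab] at h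
      omega
    · left; exact hab
  · rintro (hab | ⟨hab, hii⟩)
    · have h1 : (a - b) * L ≥ 1 * L := by
        apply mul_le_mul_of_nonneg_right <;> omega
      nlinarith
    · rw [hab]
      omega

-- insertBy only compares the inserted element with list elements, so two `before`
-- relations agreeing there insert identically
theorem pv_insertBy_congr {α : Type} (f g : α → α → Bool) (x : α) :
    ∀ (l : List α), (∀ b ∈ l, f x b = g x b) →
    PySem.List.insertBy f x l = PySem.List.insertBy g x l := by
  intro l
  induction l with
  | nil => intro _; rfl
  | cons y ys ih =>
    intro h
    simp only [PySem.List.insertBy]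
    rw [h y (by simp)]
    split_ifs with hc
    · rfl
    · rw [ih (fun b hb => h b (by simp [hb]))]

theorem pv_foldl_insertBy_congr {α : Type} (f g : α → α → Bool) (S : List α)
    (hfg : ∀ a ∈ S, ∀ b ∈ S, f a b = g a b) :
    ∀ (xs acc : List α), (∀ a ∈ xs, a ∈ S) → (∀ a ∈ acc, a ∈ S) →
    xs.foldl (fun acc x => PySem.List.insertBy f x acc) acc
      = xs.foldl (fun acc x => PySem.List.insertBy g x acc) acc := by
  intro xs
  induction xs with
  | nil => intro acc _ _; rfl
  | cons x rest ih =>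
    intro acc hxs hacc
    simp only [List.foldl_cons]
    rw [pv_insertBy_congr f g x acc (fun b hb => hfg x (hxs x (by simp)) b (hacc b hb))]
    apply ih
    · intro a ha; exact hxs a (by simp [ha])
    · intro a ha
      rcases (PySem.List.mem_insertBy g x a acc).1 ha with rfl | ha'
      · exact hxs a (by simp)
      · exact hacc a ha'

def pvOrd (v : List Int) : List Int :=
  PySem.List.sorted (PySem.List.pyRange 0 (v.length : Int) 1) (pvKey v) false

-- the tuple key (-v[i], i) orders the index range exactly like the combined integer key pvKey
theorem pvOrd2_eq_pvOrd (v : List Int) :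
    PySem.List.sorted2 (PySem.List.pyRange 0 (v.length : Int) 1)
      (fun i => -(PySem.List.pyGetD v i 0)) (fun i => i) false = pvOrd v := by
  unfold pvOrd
  simp only [PySem.List.sorted2, PySem.List.sorted, reduceIte]
  apply pv_foldl_insertBy_congr _ _ (PySem.List.pyRange 0 (v.length : Int) 1)
  · intro a ha b hb
    rw [PySem.List.mem_pyRange_one] at ha hb
    simp only [if_neg (by simp : ¬ (false = true))]
    rw [Bool.eq_iff_iff]
    simp only [Bool.or_eq_true, Bool.and_eq_true, Bool.not_eq_eq_eq_not, Bool.not_true,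
      decide_eq_true_eq, decide_eq_false_iff_not]
    rw [pvKey_lt_iff v a b (by omega) (by omega)]
    set va := PySem.List.pyGetD v a 0
    set vb := PySem.List.pyGetD v b 0
    omega
  · intro a ha; exact ha
  · intro a ha; simp at ha

theorem pvGetD_eraseIdx (v : List Int) (jn : Nat) (hj : jn < v.length) (i : Int)
    (hi : 0 ≤ i ∧ i < ((v.eraseIdx jn).length : Int)) :
    PySem.List.pyGetD (v.eraseIdx jn) i 0 = PySem.List.pyGetD v (pvG (jn : Int) i) 0 := by
  have hlen : (v.eraseIdx jn).length = v.length - 1 := by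
    rw [List.length_eraseIdx_of_lt hj]
  rw [PySem.List.pyGetD_eq_getElem _ _ hi.1 hi.2,
      List.getElem_eraseIdx (by omega)]
  unfold pvG
  split_ifs with h1 h2 h2
  · rw [PySem.List.pyGetD_eq_getElem _ _ (by omega) (by omega)]
  · omega
  · omega
  · rw [PySem.List.pyGetD_eq_getElem _ _ (by omega) (by omega)]
    congr 1
    omega

theorem pvFilter_enumerate_aux (v : List Int) : ∀ (jn : Nat) (s : Int),
    ((PySem.List.enumerate v s).filter (fun p => p.1 ≠ s + (jn : Int))).map (·.2) = v.eraseIdx jn := by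
  induction v with
  | nil => intro jn s; rfl
  | cons x xs ih =>
    intro jn s
    rw [PySem.List.enumerate_cons]
    cases jn with
    | zero =>
      simp only [Nat.cast_zero, add_zero]
      rw [List.filter_cons]
      have hhead : ¬ ((s, x).1 ≠ s) := by simp
      rw [if_neg (by simpa using hhead)]
      have hall : (PySem.List.enumerate xs (s + 1)).filter (fun p => p.1 ≠ s) = PySem.List.enumerate xs (s + 1) := by
        apply List.filter_eq_self.2
        intro p hp
        rcases (PySem.List.mem_enumerate_iff _ _ _).1 hp with ⟨k, hk, rfl⟩
        simp only [ne_eq, decide_eq_true_eq]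
        omega
      rw [hall, PySem.List.map_snd_enumerate, List.eraseIdx_cons_zero]
    | succ j =>
      rw [List.filter_cons]
      rw [if_pos (by simp; omega)]
      rw [List.map_cons, List.eraseIdx_cons_succ]
      have : (fun (p : Int × Int) => p.1 ≠ s + ((j + 1 : Nat) : Int)) = (fun p => p.1 ≠ (s + 1) + (j : Int)) := by
        funext p; simp; constructor <;> intro h <;> omega
      rw [show s + ((j + 1 : Nat) : Int) = (s + 1) + (j : Int) by push_cast; ring]
      rw [ih j (s + 1)]

theorem pvBLoop_eq_shift (order : List Int) (n : Int) : ∀ (rest : List Int) (k : Nat),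
    rest = order.drop k →
    pvBLoop order n k rest = pvShift (order.take k) (rest.take ((n - k).toNat)) := by
  intro rest
  induction rest with
  | nil => intro k _; simp [pvBLoop, pvShift]
  | cons i rest ih =>
    intro k hk
    by_cases hn : (k : Int) ≥ n
    · have : (n - k).toNat = 0 := by omega
      simp [pvBLoop, hn, this, pvShift]
    · have htn : (n - k).toNat = (n - (k + 1 : Nat)).toNat + 1 := by push_cast; omega
      have hget : order[k]? = some i := by
        rw [← List.head?_drop, ← hk, List.head?_cons]
      have hdrop : order.drop (k + 1) = rest := by
        rw [← List.tail_drop, ← hk, List.tail_cons]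
      have htake : order.take k ++ [i] = order.take (k + 1) := by
        rw [List.take_succ, hget]; rfl
      simp only [pvBLoop, if_neg hn, htn, List.take_succ_cons, pvShift]
      rw [htake, ih (k + 1) hdrop.symm]
      congr 2
      · rw [show (fun j => if j < i then (1:Int) else 0) = (fun j => if (fun j => decide (j < i)) j = true then (1:Int) else 0) by funext j; simp]
        rw [PySem.List.sum_map_ite_one_zero]

theorem pvOrd_cons (v : List Int) (m : Int) (jn : Nat)
    (hm : PySem.List.max? v (fun x => x) = some m)
    (hj : PySem.List.index? v m = some jn) :
    pvOrd v = (jn : Int) :: (pvOrd (v.eraseIdx jn)).map (pvG (jn : Int)) := by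
  obtain ⟨hlt, hvj, hfirst⟩ := PySem.List.getElem_of_index?_eq_some hj
  have hmax : ∀ y ∈ v, y ≤ m := PySem.List.max?_isMax hm
  have hlen' : (v.eraseIdx jn).length = v.length - 1 := List.length_eraseIdx_of_lt hlt
  have hcast : ((v.eraseIdx jn).length : Int) = (v.length : Int) - 1 := by omega
  have hmem' : ∀ i' ∈ pvOrd (v.eraseIdx jn), 0 ≤ i' ∧ i' < (v.length : Int) - 1 := by
    intro i' hi'
    rw [pvOrd, PySem.List.mem_sorted, PySem.List.mem_pyRange_one] at hi'
    omega
  have hval : ∀ i', 0 ≤ i' ∧ i' < (v.length : Int) - 1 →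
      PySem.List.pyGetD (v.eraseIdx jn) i' 0 = PySem.List.pyGetD v (pvG (jn : Int) i') 0 := by
    intro i' hb
    exact pvGetD_eraseIdx v jn hlt i' (by omega)
  have hvjD : PySem.List.pyGetD v (jn : Int) 0 = m := by
    rw [PySem.List.pyGetD_eq_getElem _ _ (by omega) (by omega)]
    simpa using hvj
  have hmemval : ∀ i', 0 ≤ i' ∧ i' < (v.length : Int) →
      PySem.List.pyGetD v i' 0 ≤ m := by
    intro i' hb
    rw [PySem.List.pyGetD_eq_getElem _ _ hb.1 (by omega)]
    exact hmax _ (List.getElem_mem _)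
  have hfirstD : ∀ i', 0 ≤ i' ∧ i' < (jn : Int) → PySem.List.pyGetD v i' 0 ≠ m := by
    intro i' hb
    rw [PySem.List.pyGetD_eq_getElem _ _ hb.1 (by omega)]
    exact hfirst i'.toNat (by omega)
  have hGb : ∀ i', 0 ≤ i' ∧ i' < (v.length : Int) - 1 →
      0 ≤ pvG (jn : Int) i' ∧ pvG (jn : Int) i' < (v.length : Int) := by
    intro i' hb; unfold pvG; split_ifs <;> omega
  apply PySem.List.sorted_eq_of_perm_of_pairwise_lt
  · -- permutation with pyRange 0 len
    have h1 : (pvOrd (v.eraseIdx jn)).Perm (PySem.List.pyRange 0 ((v.eraseIdx jn).length : Int) 1) :=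
      PySem.List.sorted_perm _ _ _
    have h3 : (PySem.List.pyRange 0 ((v.length : Int) - 1) 1).map (pvG (jn : Int))
        = PySem.List.pyRange 0 (jn : Int) 1 ++ PySem.List.pyRange ((jn : Int) + 1) (v.length : Int) 1 := by
      rw [PySem.List.pyRange_one_append 0 (jn : Int) ((v.length : Int) - 1) (by omega) (by omega),
          List.map_append]
      congr 1
      · apply List.map_congr_left ?_ |>.trans (List.map_id _)
        intro i hi
        rw [PySem.List.mem_pyRange_one] at hi
        unfold pvG
        rw [if_pos (by omega)]
        rfl
      · rw [PySem.List.pyRange_one (jn : Int), PySem.List.pyRange_one ((jn : Int) + 1), List.map_map]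
        rw [show ((v.length : Int) - 1 - (jn : Int)).toNat = ((v.length : Int) - ((jn : Int) + 1)).toNat by omega]
        apply List.map_congr_left
        intro k _
        simp only [Function.comp]
        unfold pvG
        rw [if_neg (by omega)]
        ring
    have h5 : PySem.List.pyRange 0 (jn : Int) 1 ++ (jn : Int) :: PySem.List.pyRange ((jn : Int) + 1) (v.length : Int) 1
        = PySem.List.pyRange 0 (v.length : Int) 1 := by
      rw [← PySem.List.pyRange_one_cons (by omega : (jn : Int) < (v.length : Int)),
          ← PySem.List.pyRange_one_append 0 (jn : Int) (v.length : Int) (by omega) (by omega)]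
    have h2 : ((pvOrd (v.eraseIdx jn)).map (pvG (jn : Int))).Perm
        (PySem.List.pyRange 0 (jn : Int) 1 ++ PySem.List.pyRange ((jn : Int) + 1) (v.length : Int) 1) := by
      have h := h1.map (pvG (jn : Int))
      rwa [hcast, h3] at h
    refine List.Perm.trans (List.Perm.cons (jn : Int) h2) ?_
    rw [← h5]
    exact List.perm_middle.symm
  · -- pairwise strictly increasing key
    rw [List.pairwise_cons]
    constructor
    · intro y hy
      rcases List.mem_map.1 hy with ⟨i', hi', rfl⟩
      have hb := hmem' i' hi'
      have hgb := hGb i' hb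
      apply (pvKey_lt_iff v (jn : Int) (pvG (jn : Int) i') (by omega) hgb).2
      rcases lt_or_eq_of_le (hmemval (pvG (jn : Int) i') hgb) with hlt2 | heq
      · left; rw [hvjD]; exact hlt2
      · right
        refine ⟨by rw [hvjD, heq], ?_⟩
        by_cases hij : i' < (jn : Int)
        · exfalso
          have : pvG (jn : Int) i' = i' := by unfold pvG; rw [if_pos hij]
          rw [this] at heq
          exact hfirstD i' ⟨hb.1, hij⟩ heq
        · unfold pvG; rw [if_neg hij]; omega
    · rw [List.pairwise_map]
      have hnd : (pvOrd (v.eraseIdx jn)).Nodup := by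
        have h1 : (pvOrd (v.eraseIdx jn)).Perm (PySem.List.pyRange 0 ((v.eraseIdx jn).length : Int) 1) :=
          PySem.List.sorted_perm _ _ _
        exact h1.symm.nodup (PySem.List.nodup_pyRange_one _ _)
      have hpw := (PySem.List.sorted_pairwise (PySem.List.pyRange 0 ((v.eraseIdx jn).length : Int) 1)
        (pvKey (v.eraseIdx jn))).and hnd
      refine hpw.imp_of_mem ?_
      intro a b ha hb hab
      have hba := hmem' a ha
      have hbb := hmem' b hb
      have hga := hGb a hba
      have hgb := hGb b hbb
      -- decode the key inequality on the erased vector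
      have hnot : ¬ (pvKey (v.eraseIdx jn) b < pvKey (v.eraseIdx jn) a) := not_lt.2 hab.1
      rw [pvKey_lt_iff (v.eraseIdx jn) b a (by omega) (by omega)] at hnot
      push_neg at hnot
      apply (pvKey_lt_iff v (pvG (jn : Int) a) (pvG (jn : Int) b) hga hgb).2
      rw [← hval a (by omega), ← hval b (by omega)]
      rcases lt_or_eq_of_le hnot.1 with hlt2 | heq
      · left; exact hlt2
      · right
        refine ⟨heq.symm, ?_⟩
        have hne : a ≠ b := hab.2
        have hle : a ≤ b := hnot.2 heq
        rw [pvG_lt_iff]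
        omega

theorem pvFilter_enumerate_eraseIdx (v : List Int) (jn : Nat) :
    ((PySem.List.enumerate v 0).filter (fun p => p.1 ≠ (jn : Int))).map (·.2) = v.eraseIdx jn := by
  have h := pvFilter_enumerate_aux v jn 0
  simpa using h

theorem pvALoop_eq_shift : ∀ (k : Nat) (v : List Int), k ≤ v.length →
    pvALoop v k = pvShift [] ((pvOrd v).take k) := by
  intro k
  induction k with
  | zero => intro v _; simp [pvALoop, pvShift]
  | succ k ih =>
    intro v hk
    cases hmm : PySem.List.max? v (fun x => x) with
    | none =>
      exfalso
      have := (PySem.List.max?_eq_none_iff v (fun x => x)).1 hmm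
      subst this
      simp at hk
    | some m =>
      have hmem : m ∈ v := PySem.List.max?_mem hmm
      obtain ⟨jn, hj⟩ := Option.isSome_iff_exists.1 ((PySem.List.index?_isSome_iff v m).2 hmem)
      obtain ⟨hlt, -, -⟩ := PySem.List.getElem_of_index?_eq_some hj
      have hlen' : (v.eraseIdx jn).length = v.length - 1 := List.length_eraseIdx_of_lt hlt
      simp only [pvALoop, hmm, hj]
      rw [pvFilter_enumerate_eraseIdx v jn, ih _ (by omega),
          pvOrd_cons v m jn hmm hj, List.take_succ_cons]
      simp only [pvShift, List.countP_nil, List.nil_append]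
      rw [← List.map_take]
      have hsm := pvShift_map_g (jn : Int) ((pvOrd (v.eraseIdx jn)).take k) []
      simp only [List.map_nil] at hsm
      rw [hsm]
      simp

-- ===== VERDICT (by name: the statement is the Claim_ definition above) =====
theorem sort_ids_by_probability_spec : Claim_equal_sort_ids_by_probability := by
  intro v n _ hpre
  unfold Pre_sort_ids_by_probability at hpre
  unfold Spec_sort_ids_by_probability
  have h1 : sort_ids_by_probability v n = pvALoop v n.toNat := rfl
  have h2 : sort_ids_by_probability_alt v n
      = pvBLoop (PySem.List.sorted2 (PySem.List.pyRange 0 (v.length : Int) 1)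
          (fun i => -(PySem.List.pyGetD v i 0)) (fun i => i) false) n 0
        (PySem.List.sorted2 (PySem.List.pyRange 0 (v.length : Int) 1)
          (fun i => -(PySem.List.pyGetD v i 0)) (fun i => i) false) := rfl
  rw [h1, h2, pvOrd2_eq_pvOrd v,
      pvBLoop_eq_shift (pvOrd v) n (pvOrd v) 0 (List.drop_zero).symm,
      pvALoop_eq_shift n.toNat v (by omega)]
  simp
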